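-- pv_equiv track=rewrite | github.com/pypi-data/pypi-mirror-252 | packages/dndfog/dndfog-0.6.5.tar.gz/dndfog-0.6.5/dndfog/markings.py | _interpolate_high
-- ===== SOURCE A (Python) =====
-- from typing import Any, Generator
--
-- def _interpolate_high(point_1: tuple[int, int], point_2: tuple[int, int]) -> Generator[tuple[int, int], Any, None]:
--     dx = point_2[0] - point_1[0]
--     dy = point_2[1] - point_1[1]
--     xi = 1
--     if dx < 0:
--         xi = -1
--         dx = -dx
--     dist = (2 * dx) - dy
--     x = point_1[0]
--
--     for y in range(point_1[1], point_2[1] + 1):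
--         yield x, y
--         if dist > 0:
--             x = x + xi
--             dist = dist + (2 * (dx - dy))
--         else:
--             dist = dist + 2 * dx
-- ===== SOURCE B (Python) =====
-- def _interpolate_high(point_1, point_2):
--     dx = point_2[0] - point_1[0]
--     dy = point_2[1] - point_1[1]
--     xi = -1 if dx < 0 else 1
--     dx = abs(dx)
--     for k in range(dy + 1):
--         steps = min(k, (2 * dx * k + dy - 1) // (2 * dy)) if k else 0
--         yield point_1[0] + xi * steps, point_1[1] + k
-- ===== Notes on version B (the rewrite author's own statement) =====
-- stated objective: alternative
-- what changed: Replaces Bresenham's stateful running error term with a stateless closed-form floor expression min(k, (2*dx*k + dy - 1)//(2*dy)) for the accumulated x-steps, generated per row by index.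
import Mathlib
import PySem

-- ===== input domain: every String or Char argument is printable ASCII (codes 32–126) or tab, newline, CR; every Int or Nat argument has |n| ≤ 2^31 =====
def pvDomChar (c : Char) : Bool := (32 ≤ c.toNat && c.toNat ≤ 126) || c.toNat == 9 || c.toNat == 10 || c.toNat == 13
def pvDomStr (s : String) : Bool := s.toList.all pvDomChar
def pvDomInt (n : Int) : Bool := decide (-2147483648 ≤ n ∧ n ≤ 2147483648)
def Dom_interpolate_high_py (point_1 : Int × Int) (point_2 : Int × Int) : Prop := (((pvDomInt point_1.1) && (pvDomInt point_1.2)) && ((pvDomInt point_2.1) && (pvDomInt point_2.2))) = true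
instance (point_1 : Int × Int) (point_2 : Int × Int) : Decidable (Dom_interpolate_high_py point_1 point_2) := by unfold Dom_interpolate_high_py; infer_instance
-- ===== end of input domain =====

-- B replaces the running Bresenham error term with a stateless closed-form floor count of x-steps (objective: alternative, same cost).

-- ===== PORT A =====
-- literal transliteration of A: running state (x, dist), loop over range(y1, y2+1)
def interpolate_high_py (point_1 : Int × Int) (point_2 : Int × Int) : List (Int × Int) :=
  let dx0 := point_2.1 - point_1.1
  let dy := point_2.2 - point_1.2
  let xi : Int := if dx0 < 0 then -1 else 1
  let dx := if dx0 < 0 then -dx0 else dx0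
  -- the yielded points are accumulated in reverse (cons) and reversed at the end (same loop, linear-time eval)
  let r := (PySem.List.pyRange point_1.2 (point_2.2 + 1) 1).foldl
    (fun (st : List (Int × Int) × Int × Int) y =>
      let acc := st.1
      let x := st.2.1
      let dist := st.2.2
      if dist > 0 then ((x, y) :: acc, x + xi, dist + 2 * (dx - dy))
      else ((x, y) :: acc, x, dist + 2 * dx))
    ([], point_1.1, 2 * dx - dy)
  r.1.reverse

-- ===== PORT B =====
-- literal transliteration of B: per-index closed form, no running state
def interpolate_high_py_alt (point_1 : Int × Int) (point_2 : Int × Int) : List (Int × Int) :=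
  let dx0 := point_2.1 - point_1.1
  let dy := point_2.2 - point_1.2
  let xi : Int := if dx0 < 0 then -1 else 1
  let dx := |dx0|
  (List.range (dy + 1).toNat).map (fun (kn : Nat) =>
    let k : Int := kn
    let steps : Int := if k = 0 then 0 else min k (PySem.Int.floordiv (2 * dx * k + dy - 1) (2 * dy))
    (point_1.1 + xi * steps, point_1.2 + k))

-- ===== PRECONDITION & SPEC =====
def Spec_interpolate_high_py (point_1 : Int × Int) (point_2 : Int × Int) (out : List (Int × Int)) : Prop := out = interpolate_high_py_alt point_1 point_2
instance (point_1 : Int × Int) (point_2 : Int × Int) (out : List (Int × Int)) : Decidable (Spec_interpolate_high_py point_1 point_2 out) := by unfold Spec_interpolate_high_py; infer_instance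

-- ===== CLAIM (what is proved, stated in full; the proofs are below) =====
def Claim_equal_interpolate_high_py : Prop := ∀ (point_1 : Int × Int) (point_2 : Int × Int), Dom_interpolate_high_py point_1 point_2 → Spec_interpolate_high_py point_1 point_2 (interpolate_high_py point_1 point_2)


-- ===== LEMMAS AND PROOFS =====

-- the closed-form step count used by B, as a function of the iteration index
def pvS (dx dy : Int) (k : Nat) : Int :=
  if (k : Int) = 0 then 0 else min (k : Int) (PySem.Int.floordiv (2 * dx * k + dy - 1) (2 * dy))

-- A's error term after k iterations, expressed through the step count
def pvD (dx dy : Int) (k : Nat) : Int := 2 * dx * (k + 1) - dy * (2 * pvS dx dy k + 1)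

lemma pvS_zero (dx dy : Int) : pvS dx dy 0 = 0 := by simp [pvS]

lemma pvF_zero (dx dy : Int) (hdy : 0 < dy) :
    PySem.Int.floordiv (2 * dx * (0:Nat) + dy - 1) (2 * dy) = 0 := by
  rw [PySem.Int.floordiv_eq_iff_of_pos (by omega)]
  push_cast
  constructor <;> nlinarith

lemma pvS_step (dx dy : Int) (hdx : 0 ≤ dx) (hdy : 0 < dy) (k : Nat) :
    pvS dx dy (k + 1) = pvS dx dy k + (if pvD dx dy k > 0 then 1 else 0) := by
  by_cases hcase : dy ≤ dx
  · -- dx ≥ dy: the error term is always positive and every row advances x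
    have hs : ∀ j : Nat, pvS dx dy j = j := by
      intro j
      unfold pvS
      split
      · omega
      · have hge : (j : Int) ≤ PySem.Int.floordiv (2 * dx * j + dy - 1) (2 * dy) := by
          rw [PySem.Int.le_floordiv_iff_mul_le (by omega)]
          have h1 : (j : Int) * (2 * dy) ≤ (j : Int) * (2 * dx) := by
            apply mul_le_mul_of_nonneg_left (by omega) (by positivity)
          nlinarith
        omega
    have hD : pvD dx dy k > 0 := by
      unfold pvD
      rw [hs k]
      have h1 : ((k : Int) + 1) * (2 * dy) ≤ ((k : Int) + 1) * (2 * dx) := by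
        apply mul_le_mul_of_nonneg_left (by omega) (by positivity)
      nlinarith
    rw [hs, hs, if_pos hD]
    push_cast
    ring
  · -- dx < dy: the step count is the floor expression; one fdiv step
    rw [not_le] at hcase
    have hfle : ∀ j : Nat, PySem.Int.floordiv (2 * dx * j + dy - 1) (2 * dy) ≤ (j : Int) := by
      intro j
      have : PySem.Int.floordiv (2 * dx * j + dy - 1) (2 * dy) < (j : Int) + 1 := by
        rw [PySem.Int.floordiv_lt_iff_lt_mul (by omega)]
        have h1 : (j : Int) * (2 * dx) ≤ (j : Int) * (2 * dy) := by
          apply mul_le_mul_of_nonneg_left (by omega) (by positivity)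
        nlinarith
      omega
    have hs : ∀ j : Nat, pvS dx dy j = PySem.Int.floordiv (2 * dx * j + dy - 1) (2 * dy) := by
      intro j
      unfold pvS
      split
      · next hj =>
        have hj0 : j = 0 := by exact_mod_cast hj
        rw [hj0, pvF_zero dx dy hdy]
      · exact min_eq_right (hfle j)
    set b : Int := 2 * dy with hbdef
    have hb : 0 < b := by omega
    set n : Int := 2 * dx * k + dy - 1 with hndef
    set q : Int := PySem.Int.floordiv n b with hqdef
    have hn : q * b + PySem.Int.mod n b = n := PySem.Int.floordiv_mul_add_mod n b
    set r : Int := PySem.Int.mod n b with hrdef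
    have hr0 : 0 ≤ r := PySem.Int.mod_nonneg n hb
    have hrb : r < b := PySem.Int.mod_lt n hb
    have hn' : 2 * dx * ((k + 1 : Nat) : Int) + dy - 1 = n + 2 * dx := by
      rw [hndef]; push_cast; ring
    have hDk : pvD dx dy k = r + 2 * dx + 1 - b := by
      unfold pvD
      rw [hs k, ← hqdef]
      have e1 : dy * (2 * q + 1) = q * b + dy := by rw [hbdef]; ring
      have e2 : 2 * dx * ((k:Int) + 1) = n + 2 * dx - dy + 1 := by rw [hndef]; ring
      rw [e1, e2]
      omega
    rw [hs k, hs (k + 1), ← hqdef, hn', hDk]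
    have e3 : (q + 1) * b = q * b + b := by ring
    have e4 : (q + 1 + 1) * b = q * b + b + b := by ring
    have h2dx : 2 * dx < b := by omega
    by_cases hstep : b ≤ r + 2 * dx
    · have hgoal : PySem.Int.floordiv (n + 2 * dx) b = q + 1 := by
        rw [PySem.Int.floordiv_eq_iff_of_pos hb]
        constructor
        · linarith
        · linarith
      rw [hgoal, if_pos (by omega)]
    · rw [not_le] at hstep
      have hgoal : PySem.Int.floordiv (n + 2 * dx) b = q := by
        rw [PySem.Int.floordiv_eq_iff_of_pos hb]
        constructor
        · linarith
        · linarith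
      rw [hgoal, if_neg (by omega), add_zero]

lemma loop_lemma (x1 y1 xi dx dy : Int) (hdx : 0 ≤ dx) (hdy : 0 < dy) :
    ∀ n : Nat,
      ((List.range n).map (fun (i : Nat) => y1 + (i : Int))).foldl
        (fun (st : List (Int × Int) × Int × Int) y =>
          if st.2.2 > 0 then ((st.2.1, y) :: st.1, st.2.1 + xi, st.2.2 + 2 * (dx - dy))
          else ((st.2.1, y) :: st.1, st.2.1, st.2.2 + 2 * dx))
        ([], x1, 2 * dx - dy)
      = (((List.range n).map (fun (i : Nat) => (x1 + xi * pvS dx dy i, y1 + (i : Int)))).reverse,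
         x1 + xi * pvS dx dy n, pvD dx dy n) := by
  intro n
  induction n with
  | zero =>
    simp only [List.range_zero, List.map_nil, List.reverse_nil, List.foldl_nil, pvS_zero, pvD, Prod.mk.injEq]
    exact ⟨trivial, by ring, by push_cast; ring⟩
  | succ m ih =>
    rw [List.range_succ, List.map_append, List.map_append, List.foldl_append, ih]
    simp only [List.map_cons, List.map_nil, List.foldl_cons, List.foldl_nil,
      List.reverse_append, List.reverse_cons, List.reverse_nil, List.nil_append,
      List.singleton_append]
    have hstep := pvS_step dx dy hdx hdy m
    by_cases h : pvD dx dy m > 0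
    · rw [if_pos h]
      rw [if_pos h] at hstep
      have h2 : x1 + xi * pvS dx dy m + xi = x1 + xi * pvS dx dy (m + 1) := by
        rw [hstep]; ring
      have h3 : pvD dx dy m + 2 * (dx - dy) = pvD dx dy (m + 1) := by
        simp only [pvD, hstep]; push_cast; ring
      rw [h2, h3]
    · rw [if_neg h]
      rw [if_neg h, add_zero] at hstep
      have h3 : pvD dx dy m + 2 * dx = pvD dx dy (m + 1) := by
        simp only [pvD, hstep]; push_cast; ring
      rw [hstep, h3]

-- ===== VERDICT (by name: the statement is the Claim_ definition above) =====
theorem interpolate_high_py_spec : Claim_equal_interpolate_high_py := by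
  intro p1 p2 _
  unfold Spec_interpolate_high_py interpolate_high_py interpolate_high_py_alt
  simp only []
  set x1 := p1.1
  set y1 := p1.2
  set dx0 := p2.1 - p1.1 with hdx0
  set dy := p2.2 - p1.2 with hdy
  set xi : Int := if dx0 < 0 then -1 else 1 with hxi
  have habs : |dx0| = if dx0 < 0 then -dx0 else dx0 := by
    by_cases h : dx0 < 0
    · simp [h, abs_of_neg h]
    · simp [h, abs_of_nonneg (not_lt.mp h)]
  set dx := if dx0 < 0 then -dx0 else dx0 with hdx
  have hdxpos : 0 ≤ dx := by rw [hdx]; split <;> omega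
  rw [habs]
  have hy2 : p2.2 + 1 = y1 + dy + 1 := by rw [hdy]; ring
  rcases lt_trichotomy dy 0 with hneg | hzero | hpos
  · -- dy < 0 : empty range on both sides
    rw [hy2, PySem.List.pyRange_one_eq_nil (by omega)]
    have : (dy + 1).toNat = 0 := by omega
    simp [this]
  · -- dy = 0 : a single row
    rw [hy2, hzero]
    rw [show y1 + 0 + 1 = y1 + 1 by ring, PySem.List.pyRange_one_singleton]
    have h1 : ((0 : Int) + 1).toNat = 1 := by decide
    rw [h1]
    simp only [List.foldl_cons, List.foldl_nil, List.range_one, List.map_cons, List.map_nil]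
    split <;> simp
  · -- dy > 0 : the loop lemma applies
    rw [hy2, PySem.List.pyRange_one]
    have hsub : (y1 + dy + 1 - y1).toNat = (dy + 1).toNat := by omega
    rw [hsub]
    rw [loop_lemma x1 y1 xi dx dy hdxpos hpos ((dy + 1).toNat)]
    simp only [List.reverse_reverse]
    apply List.map_congr_left
    intro k _
    simp [pvS]
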